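-- pv_equiv track=rewrite | github.com/svaraclustering/svaraclustering | experiments/context_investigation.py | asc_or_desc
-- ===== SOURCE A (Python) =====
-- allsvaras = ['sa', 'ri', 'ga', 'ma', 'pa', 'dha', 'ni']
--
-- def asc_or_desc(s1, s2):
-- 	if s2 == 'silence':
-- 		return 'to_silence'
-- 	if s1 == 'silence':
-- 		return 'from_silence'
-- 	if s1 == s2:
-- 		return 'same'
--
-- 	si = allsvaras.index(s2)
-- 	sort = [allsvaras[(si-3+i) % len(allsvaras)] for i in range(7)]
--
-- 	si1 = sort.index(s1)
-- 	si2 = sort.index(s2)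
--
-- 	if si2 > si1:
-- 		return 'asc'
-- 	elif si1 > si2:
-- 		return 'desc'
--
-- 	raise Exception('what?')
-- ===== SOURCE B (Python) =====
-- allsvaras = ['sa', 'ri', 'ga', 'ma', 'pa', 'dha', 'ni']
--
-- def asc_or_desc(s1, s2):
-- 	if s2 == 'silence':
-- 		return 'to_silence'
-- 	if s1 == 'silence':
-- 		return 'from_silence'
-- 	if s1 == s2:
-- 		return 'same'
-- 	i1 = allsvaras.index(s1)
-- 	i2 = allsvaras.index(s2)
-- 	return 'asc' if (i2 - i1) % 7 <= 3 else 'desc'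
-- ===== Notes on version B (the rewrite author's own statement) =====
-- stated objective: simpler
-- what changed: Replaces the construction of a rotated 7-element list centered on s2 plus two linear list searches with direct modular arithmetic on the two scale indices: d = (i2 - i1) % 7, 'asc' iff d <= 3.
import Mathlib
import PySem

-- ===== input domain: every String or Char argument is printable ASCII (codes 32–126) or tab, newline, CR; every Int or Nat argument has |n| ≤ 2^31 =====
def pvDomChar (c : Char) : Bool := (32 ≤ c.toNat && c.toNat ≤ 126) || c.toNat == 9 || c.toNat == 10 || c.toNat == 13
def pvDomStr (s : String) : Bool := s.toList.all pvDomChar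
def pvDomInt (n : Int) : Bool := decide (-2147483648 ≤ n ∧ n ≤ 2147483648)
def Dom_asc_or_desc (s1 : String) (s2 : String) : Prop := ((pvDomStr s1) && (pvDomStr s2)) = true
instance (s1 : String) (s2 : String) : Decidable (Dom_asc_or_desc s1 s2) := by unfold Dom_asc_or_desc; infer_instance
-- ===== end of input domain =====

-- B replaces A's rotated-list construction and two list searches by modular arithmetic
-- on the two scale indices (simpler, same behaviour).

-- ===== PORT A =====
def allsvaras : List String := ["sa", "ri", "ga", "ma", "pa", "dha", "ni"]

def asc_or_desc (s1 : String) (s2 : String) : String :=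
  if s2 = "silence" then "to_silence"
  else if s1 = "silence" then "from_silence"
  else if s1 = s2 then "same"
  else
    match PySem.List.index? allsvaras s2 with
    | none => ""   -- Python raises ValueError here; excluded by Pre_
    | some si =>
      let sort : List String :=
        (PySem.List.pyRange 0 7 1).map (fun i =>
          (PySem.List.pyGet? allsvaras (PySem.Int.mod (si - 3 + i) (PySem.List.len allsvaras))).getD "")
      match PySem.List.index? sort s1, PySem.List.index? sort s2 with
      | some si1, some si2 =>
          if si2 > si1 then "asc"
          else if si1 > si2 then "desc"
          else ""   -- Python: raise Exception('what?'); unreachable under Pre_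
      | _, _ => ""  -- Python raises ValueError here; excluded by Pre_

-- ===== PORT B =====
def allsvaras_b : List String := ["sa", "ri", "ga", "ma", "pa", "dha", "ni"]

def asc_or_desc_alt (s1 : String) (s2 : String) : String :=
  if s2 = "silence" then "to_silence"
  else if s1 = "silence" then "from_silence"
  else if s1 = s2 then "same"
  else
    -- Python raises ValueError when an index lookup fails; excluded by Pre_ (default "")
    (Option.bind (PySem.List.index? allsvaras_b s1) (fun i1 =>
      Option.map (fun i2 => if PySem.Int.mod (i2 - i1) 7 ≤ 3 then "asc" else "desc")
        (PySem.List.index? allsvaras_b s2))).getD ""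

-- ===== PRECONDITION & SPEC =====
-- Pre_ excludes exactly the inputs where the Python A raises (ValueError from
-- allsvaras.index / sort.index when an argument past the guards is not a svara).
def Pre_asc_or_desc (s1 : String) (s2 : String) : Prop :=
  s2 = "silence" ∨ s1 = "silence" ∨ s1 = s2 ∨
    (s1 ∈ (["sa", "ri", "ga", "ma", "pa", "dha", "ni"] : List String) ∧
     s2 ∈ (["sa", "ri", "ga", "ma", "pa", "dha", "ni"] : List String))
instance (s1 : String) (s2 : String) : Decidable (Pre_asc_or_desc s1 s2) := by
  unfold Pre_asc_or_desc; infer_instance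

def pvWitness_asc_or_desc : String × String := ("sa", "pa")

def Spec_asc_or_desc (s1 : String) (s2 : String) (out : String) : Prop := out = asc_or_desc_alt s1 s2
instance (s1 : String) (s2 : String) (out : String) : Decidable (Spec_asc_or_desc s1 s2 out) := by unfold Spec_asc_or_desc; infer_instance

-- ===== CLAIM (what is proved, stated in full; the proofs are below) =====
def Claim_equal_asc_or_desc : Prop := ∀ (s1 : String) (s2 : String), Dom_asc_or_desc s1 s2 → Pre_asc_or_desc s1 s2 → Spec_asc_or_desc s1 s2 (asc_or_desc s1 s2)

-- ===== LEMMAS AND PROOFS =====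

-- On the guard cases both programs agree immediately.
theorem agree_of_guards (s1 s2 : String)
    (h : s2 = "silence" ∨ s1 = "silence" ∨ s1 = s2) :
    asc_or_desc s1 s2 = asc_or_desc_alt s1 s2 := by
  unfold asc_or_desc asc_or_desc_alt
  rcases h with h | h | h
  · simp [h]
  · by_cases h2 : s2 = "silence" <;> simp [h, h2]
  · by_cases h2 : s2 = "silence" <;> simp [h, h2]

-- When both arguments are svaras, finite case analysis (49 literal cases).
theorem agree_of_mem (s1 s2 : String)
    (h1 : s1 ∈ allsvaras) (h2 : s2 ∈ allsvaras) :
    asc_or_desc s1 s2 = asc_or_desc_alt s1 s2 := by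
  simp only [allsvaras, List.mem_cons, List.not_mem_nil, or_false] at h1 h2
  rcases h1 with h1 | h1 | h1 | h1 | h1 | h1 | h1 <;>
    rcases h2 with h2 | h2 | h2 | h2 | h2 | h2 | h2 <;>
      subst h1 <;> subst h2 <;> decide

-- ===== VERDICT (by name: the statement is the Claim_ definition above) =====
theorem asc_or_desc_spec : Claim_equal_asc_or_desc := by
  intro s1 s2 _ hpre
  show asc_or_desc s1 s2 = asc_or_desc_alt s1 s2
  rcases hpre with h | h | h | ⟨h1, h2⟩
  · exact agree_of_guards s1 s2 (Or.inl h)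
  · exact agree_of_guards s1 s2 (Or.inr (Or.inl h))
  · exact agree_of_guards s1 s2 (Or.inr (Or.inr h))
  · exact agree_of_mem s1 s2 h1 h2
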